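-- pv_equiv track=rewrite | github.com/ilianaRapti/CoderGames2025 | Task2.py | grav_centers
-- ===== SOURCE A (Python) =====
-- def array_offsets(i, j, N, M):
--     #16 neighbour numbers
--     offset_nums = [(-2,-2), (-2,-1), (-2,0), (-2,1), (-2, 2),
--                (-1,2), (-1,-1), (-1,0), (-1,1), (-1, 2),
--                (0,-2), (0, -1), (0,1), (0,2), (1,-2),
--                (1,-1), (1,0), (1, 1), (1, 2), (2, -2),
--                (2, -1), (2,0), (2,1), (2,2)]
--     return [((i+di) % N, (j+dj) % M) for di, dj in offset_nums]
--
-- def grav_centers(universe, N, M):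
--     centers=[]
--
--     for i in range(N):
--         for j in range(M):
--             neighbour_nums = array_offsets(i, j, N, M)
--             if all(universe[i][j] > universe[ni][nj] for ni, nj in neighbour_nums):
--                 centers.append((i,j))
--     return centers
-- ===== SOURCE B (Python) =====
-- def grav_centers(universe, N, M):
--     if N <= 0 or M <= 0:
--         return []
--     offsets = [(-2,-2), (-2,-1), (-2,0), (-2,1), (-2, 2),
--                (-1,2), (-1,-1), (-1,0), (-1,1), (-1, 2),
--                (0,-2), (0, -1), (0,1), (0,2), (1,-2),
--                (1,-1), (1,0), (1, 1), (1, 2), (2, -2),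
--                (2, -1), (2,0), (2,1), (2,2)]
--     is_center = [[True] * M for _ in range(N)]
--     for di, dj in offsets:
--         for i in range(N):
--             for j in range(M):
--                 if universe[i][j] <= universe[(i + di) % N][(j + dj) % M]:
--                     is_center[i][j] = False
--     return [(i, j) for i in range(N) for j in range(M) if is_center[i][j]]
-- ===== Notes on version B (the rewrite author's own statement) =====
-- stated objective: alternative
-- what changed: Inverts the loop nesting: offsets become the outer loop and a whole-grid boolean elimination mask replaces the per-cell all() check over freshly built neighbour coordinate lists; centers are read off the surviving mask at the end.
import Mathlib
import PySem

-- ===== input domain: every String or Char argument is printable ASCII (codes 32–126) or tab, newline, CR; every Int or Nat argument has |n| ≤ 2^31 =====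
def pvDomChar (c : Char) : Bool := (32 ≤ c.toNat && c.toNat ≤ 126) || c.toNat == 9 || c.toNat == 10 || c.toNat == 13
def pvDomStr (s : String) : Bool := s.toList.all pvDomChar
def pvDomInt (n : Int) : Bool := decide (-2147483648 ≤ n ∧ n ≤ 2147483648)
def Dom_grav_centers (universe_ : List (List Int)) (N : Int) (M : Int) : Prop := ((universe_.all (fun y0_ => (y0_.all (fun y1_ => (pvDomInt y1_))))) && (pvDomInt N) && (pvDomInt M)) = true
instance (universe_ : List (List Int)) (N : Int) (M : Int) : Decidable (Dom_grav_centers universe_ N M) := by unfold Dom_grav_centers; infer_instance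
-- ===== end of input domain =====

-- B inverts the loop nesting (offsets outer, grid inner) and keeps a boolean elimination
-- mask instead of a per-cell all() check; same return value, alternative decomposition.


-- the 24 (duplicate-containing) fixed offsets shared by both sources
def pvOffsets : List (Int × Int) :=
  [(-2,-2), (-2,-1), (-2,0), (-2,1), (-2,2),
   (-1,2), (-1,-1), (-1,0), (-1,1), (-1,2),
   (0,-2), (0,-1), (0,1), (0,2), (1,-2),
   (1,-1), (1,0), (1,1), (1,2), (2,-2),
   (2,-1), (2,0), (2,1), (2,2)]

-- universe[i][j]; in-range under Pre_, so the getD defaults are never taken there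
def pvCell (u : List (List Int)) (i j : Int) : Int :=
  PySem.List.pyGetD (PySem.List.pyGetD u i []) j 0

-- ===== PORT A =====
def array_offsets (i j N M : Int) : List (Int × Int) :=
  pvOffsets.map (fun p => (PySem.Int.mod (i + p.1) N, PySem.Int.mod (j + p.2) M))

def grav_centers (universe_ : List (List Int)) (N : Int) (M : Int) : List (Int × Int) :=
  (PySem.List.pyRange 0 N 1).foldl (fun cs i =>
    (PySem.List.pyRange 0 M 1).foldl (fun cs j =>
      if (array_offsets i j N M).all (fun q => decide (pvCell universe_ q.1 q.2 < pvCell universe_ i j))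
      then cs ++ [(i, j)] else cs) cs) []

-- ===== PORT B =====
def grav_centers_alt (universe_ : List (List Int)) (N : Int) (M : Int) : List (Int × Int) :=
  if N ≤ 0 ∨ M ≤ 0 then []
  else
    let mask0 : List (List Bool) := (List.range N.toNat).map (fun _ => List.replicate M.toNat true)
    let mask : List (List Bool) := pvOffsets.foldl (fun m p =>
      (List.range N.toNat).map (fun (i : Nat) =>
        (List.range M.toNat).map (fun (j : Nat) =>
          (m.getD i []).getD j true &&
            !decide (pvCell universe_ (i : Int) (j : Int) ≤
              pvCell universe_ (PySem.Int.mod ((i : Int) + p.1) N) (PySem.Int.mod ((j : Int) + p.2) M))))) mask0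
    (List.range N.toNat).flatMap (fun (i : Nat) =>
      ((List.range M.toNat).filter (fun (j : Nat) => (mask.getD i []).getD j true)).map
        (fun (j : Nat) => ((i : Int), (j : Int))))

-- ===== PRECONDITION & SPEC =====
-- Pre_ excludes exactly the inputs where Python A raises IndexError: N,M positive with
-- N > len(universe) or some of the first N rows shorter than M.
def Pre_grav_centers (universe_ : List (List Int)) (N : Int) (M : Int) : Prop :=
  N ≤ 0 ∨ M ≤ 0 ∨ (N ≤ (universe_.length : Int) ∧
    ∀ r ∈ universe_.take N.toNat, M ≤ (r.length : Int))
instance (universe_ : List (List Int)) (N : Int) (M : Int) : Decidable (Pre_grav_centers universe_ N M) := by unfold Pre_grav_centers; infer_instance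

def pvWitness_grav_centers : List (List Int) × Int × Int := ([[5, 1], [1, 1]], 2, 2)

def Spec_grav_centers (universe_ : List (List Int)) (N : Int) (M : Int) (out : List (Int × Int)) : Prop := out = grav_centers_alt universe_ N M
instance (universe_ : List (List Int)) (N : Int) (M : Int) (out : List (Int × Int)) : Decidable (Spec_grav_centers universe_ N M out) := by unfold Spec_grav_centers; infer_instance

-- ===== CLAIM (what is proved, stated in full; the proofs are below) =====
def Claim_equal_grav_centers : Prop := ∀ (universe_ : List (List Int)) (N : Int) (M : Int), Dom_grav_centers universe_ N M → Pre_grav_centers universe_ N M → Spec_grav_centers universe_ N M (grav_centers universe_ N M)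

-- ===== LEMMAS AND PROOFS =====

-- "cell (i,j) beats every offset neighbour": the predicate both programs decide
def pvP (u : List (List Int)) (N M i j : Int) : Bool :=
  pvOffsets.all (fun p =>
    decide (pvCell u (PySem.Int.mod (i + p.1) N) (PySem.Int.mod (j + p.2) M) < pvCell u i j))

-- canonical value both ports are reduced to
def pvCanon (u : List (List Int)) (N M : Int) : List (Int × Int) :=
  (List.range N.toNat).flatMap (fun (i : Nat) =>
    ((List.range M.toNat).filter (fun (j : Nat) => pvP u N M (i : Int) (j : Int))).map
      (fun (j : Nat) => ((i : Int), (j : Int))))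

lemma pvRange0 (N : Int) : PySem.List.pyRange 0 N 1 = (List.range N.toNat).map (fun (k : Nat) => (k : Int)) := by
  rcases (by omega : N ≤ 0 ∨ 0 < N) with h | h
  · have : N.toNat = 0 := by omega
    rw [this]
    simp [PySem.List.pyRange]
    omega
  · have : N = (N.toNat : Int) := by omega
    rw [this]
    exact PySem.List.pyRange_zero_natCast N.toNat

lemma pvA_canon (u : List (List Int)) (N M : Int) : grav_centers u N M = pvCanon u N M := by
  unfold grav_centers pvCanon
  rw [pvRange0, pvRange0]
  simp only [List.foldl_map]
  have hinner : ∀ (i : Int) (cs : List (Int × Int)),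
      List.foldl (fun cs (j : Nat) =>
        if (array_offsets i (j : Int) N M).all (fun q => decide (pvCell u q.1 q.2 < pvCell u i (j : Int)))
        then cs ++ [(i, (j : Int))] else cs) cs (List.range M.toNat)
      = cs ++ ((List.range M.toNat).filter (fun (j : Nat) => pvP u N M i (j : Int))).map (fun (j : Nat) => (i, (j : Int))) := by
    intro i cs
    have := PySem.List.foldl_append_if
      (fun (j : Nat) => (array_offsets i (j : Int) N M).all (fun q => decide (pvCell u q.1 q.2 < pvCell u i (j : Int))))
      (fun (j : Nat) => (i, (j : Int))) (List.range M.toNat) cs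
    rw [this]
    have hp : (fun (j : Nat) => (array_offsets i (j : Int) N M).all (fun q => decide (pvCell u q.1 q.2 < pvCell u i (j : Int))))
        = (fun (j : Nat) => pvP u N M i (j : Int)) := by
      funext j
      simp only [array_offsets, List.all_map, pvP]
      rfl
    rw [hp]
  simp only [hinner]
  rw [PySem.List.foldl_append_eq_flatMap]
  simp only [List.nil_append]

-- B's survival test for one offset
def pvLive (u : List (List Int)) (N M : Int) (p : Int × Int) (i j : Int) : Bool :=
  !decide (pvCell u i j ≤ pvCell u (PySem.Int.mod (i + p.1) N) (PySem.Int.mod (j + p.2) M))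

-- the mask after processing a list of offsets
def pvMsk (u : List (List Int)) (N M : Int) (L : List (Int × Int)) : List (List Bool) :=
  (List.range N.toNat).map (fun (i : Nat) =>
    (List.range M.toNat).map (fun (j : Nat) => L.all (fun p => pvLive u N M p (i : Int) (j : Int))))

lemma pvMsk_getD (u : List (List Int)) (N M : Int) (L : List (Int × Int))
    {i j : Nat} (hi : i < N.toNat) (hj : j < M.toNat) :
    ((pvMsk u N M L).getD i []).getD j true = L.all (fun p => pvLive u N M p (i : Int) (j : Int)) := by
  simp [pvMsk, List.getD_eq_getElem?_getD, hi, hj]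

lemma pvMsk_fold (u : List (List Int)) (N M : Int) (offs : List (Int × Int)) :
    ∀ (L : List (Int × Int)),
    offs.foldl (fun m p =>
      (List.range N.toNat).map (fun (i : Nat) =>
        (List.range M.toNat).map (fun (j : Nat) =>
          (m.getD i []).getD j true &&
            !decide (pvCell u (i : Int) (j : Int) ≤
              pvCell u (PySem.Int.mod ((i : Int) + p.1) N) (PySem.Int.mod ((j : Int) + p.2) M)))))
      (pvMsk u N M L)
    = pvMsk u N M (L ++ offs) := by
  induction offs with
  | nil => intro L; simp
  | cons p offs ih =>
    intro L
    have hstep : (List.range N.toNat).map (fun (i : Nat) =>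
        (List.range M.toNat).map (fun (j : Nat) =>
          ((pvMsk u N M L).getD i []).getD j true &&
            !decide (pvCell u (i : Int) (j : Int) ≤
              pvCell u (PySem.Int.mod ((i : Int) + p.1) N) (PySem.Int.mod ((j : Int) + p.2) M))))
        = pvMsk u N M (L ++ [p]) := by
      unfold pvMsk
      apply List.map_congr_left
      intro i hi
      apply List.map_congr_left
      intro j hj
      simp [List.getD_eq_getElem?_getD, List.mem_range.mp hi, List.mem_range.mp hj, pvLive]
    rw [List.foldl_cons, hstep, ih (L ++ [p])]
    simp

lemma pvLive_eq (u : List (List Int)) (N M : Int) (p : Int × Int) (i j : Int) :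
    pvLive u N M p i j
      = decide (pvCell u (PySem.Int.mod (i + p.1) N) (PySem.Int.mod (j + p.2) M) < pvCell u i j) := by
  unfold pvLive
  by_cases h : pvCell u i j ≤ pvCell u (PySem.Int.mod (i + p.1) N) (PySem.Int.mod (j + p.2) M)
  · simp [h, not_lt.mpr h]
  · simp [h, not_le.mp h]

lemma pvB_canon (u : List (List Int)) (N M : Int) : grav_centers_alt u N M = pvCanon u N M := by
  simp only [grav_centers_alt]
  unfold pvCanon
  split_ifs with h
  · rcases h with h | h
    · have : N.toNat = 0 := by omega
      simp [this]
    · have : M.toNat = 0 := by omega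
      simp [this]
  · have hmask0 : (List.range N.toNat).map (fun _ => List.replicate M.toNat true)
        = pvMsk u N M [] := by
      unfold pvMsk
      apply List.map_congr_left
      intro i _
      simp
    rw [hmask0, pvMsk_fold u N M pvOffsets []]
    rw [List.flatMap_def, List.flatMap_def]
    congr 1
    apply List.map_congr_left
    intro i hi
    congr 1
    apply List.filter_congr
    intro j hj
    rw [pvMsk_getD u N M _ (List.mem_range.mp hi) (List.mem_range.mp hj)]
    unfold pvP
    simp only [List.nil_append, pvLive_eq]

-- ===== VERDICT (by name: the statement is the Claim_ definition above) =====
theorem grav_centers_spec : Claim_equal_grav_centers := by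
  intro u N M _ _
  unfold Spec_grav_centers
  rw [pvA_canon, pvB_canon]
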